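-- pv_equiv track=rewrite | github.com/RedesBrasil/swrb | switchcli/cli/parser.py | match_command
-- ===== SOURCE A (Python) =====
-- class AmbiguousCommand(Exception):
--     def __init__(self, token, matches):
--         self.token = token
--         self.matches = matches
--         super().__init__(
--             f"% Ambiguous command:  \"{token}\"")
--
-- class InvalidCommand(Exception):
--     def __init__(self, token):
--         self.token = token
--         super().__init__(
--             f"% Invalid input detected at '^' marker.")
--
-- def match_command(input_token, valid_commands):
--     """
--     Retorna o comando completo se input_token e prefixo unico.
--     match_command("sh", ["show", "shutdown"]) -> ambiguo
--     match_command("sho", ["show", "shutdown"]) -> "show"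
--     """
--     lower = input_token.lower()
--     # Primeiro: match exato
--     for cmd in valid_commands:
--         if cmd.lower() == lower:
--             return cmd
--     # Segundo: match por prefixo
--     matches = [cmd for cmd in valid_commands if cmd.lower().startswith(lower)]
--     if len(matches) == 1:
--         return matches[0]
--     elif len(matches) > 1:
--         raise AmbiguousCommand(input_token, matches)
--     else:
--         raise InvalidCommand(input_token)
-- ===== SOURCE B (Python) =====
-- class AmbiguousCommand(Exception):
--     def __init__(self, token, matches):
--         self.token = token
--         self.matches = matches
--         super().__init__(
--             f"% Ambiguous command:  \"{token}\"")
--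
-- class InvalidCommand(Exception):
--     def __init__(self, token):
--         self.token = token
--         super().__init__(
--             f"% Invalid input detected at '^' marker.")
--
-- def match_command(input_token, valid_commands):
--     lower = input_token.lower()
--     matches = []
--     exact = None
--     for cmd in valid_commands:
--         cl = cmd.lower()
--         if cl.startswith(lower):
--             matches.append(cmd)
--         if exact is None and cl == lower:
--             exact = cmd
--     if exact is not None:
--         return exact
--     if len(matches) == 1:
--         return matches[0]
--     elif len(matches) > 1:
--         raise AmbiguousCommand(input_token, matches)
--     else:
--         raise InvalidCommand(input_token)
-- ===== Notes on version B (the rewrite author's own statement) =====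
-- stated objective: alternative
-- what changed: B replaces A's two separate scans (an exact-match loop, then a prefix filter comprehension) by one fold over valid_commands that simultaneously accumulates the prefix-match list and records the first exact match.
import Mathlib
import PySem

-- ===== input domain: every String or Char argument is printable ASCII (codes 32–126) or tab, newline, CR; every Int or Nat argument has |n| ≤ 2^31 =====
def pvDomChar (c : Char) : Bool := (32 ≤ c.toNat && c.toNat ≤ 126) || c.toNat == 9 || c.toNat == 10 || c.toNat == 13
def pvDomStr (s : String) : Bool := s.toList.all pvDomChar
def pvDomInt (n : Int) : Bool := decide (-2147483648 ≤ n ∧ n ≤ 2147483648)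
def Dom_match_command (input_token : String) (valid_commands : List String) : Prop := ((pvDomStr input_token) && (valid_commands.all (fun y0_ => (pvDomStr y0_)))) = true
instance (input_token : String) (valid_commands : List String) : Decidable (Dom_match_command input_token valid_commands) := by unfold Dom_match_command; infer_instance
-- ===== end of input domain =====

-- B fuses A's exact-match loop and prefix filter into ONE fold; on A's raise paths both ports return "" (excluded by Pre_).

-- ===== PORT A =====
-- A's first loop: return the first cmd whose lower() equals lower
def pvFindExact (lower : String) : List String → Option String
  | [] => none
  | cmd :: rest =>
      if PySem.Str.lower cmd = lower then some cmd else pvFindExact lower rest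

def match_command (input_token : String) (valid_commands : List String) : String :=
  let lower := PySem.Str.lower input_token
  match pvFindExact lower valid_commands with
  | some cmd => cmd
  | none =>
      let ms := valid_commands.filter (fun cmd => PySem.Str.startswith (PySem.Str.lower cmd) lower)
      if ms.length = 1 then ms.headD ""
      else ""  -- Python raises AmbiguousCommand / InvalidCommand here (outside Pre_)

-- ===== PORT B =====
-- B's single pass: state = (prefix ms so far, first exact match if any)
def pvStep (lower : String) (s : List String × Option String) (cmd : String) :
    List String × Option String :=
  let cl := PySem.Str.lower cmd
  ( (if PySem.Str.startswith cl lower then s.1 ++ [cmd] else s.1),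
    (match s.2 with
     | some e => some e
     | none => if cl = lower then some cmd else none) )

def match_command_alt (input_token : String) (valid_commands : List String) : String :=
  let lower := PySem.Str.lower input_token
  let s := valid_commands.foldl (pvStep lower) ([], none)
  match s.2 with
  | some e => e
  | none =>
      if s.1.length = 1 then s.1.headD ""
      else ""  -- Python raises AmbiguousCommand / InvalidCommand here (outside Pre_)

-- ===== PRECONDITION & SPEC =====
-- Exactly the inputs where the Python returns: some command ms the lowered
-- token exactly, or exactly one command has it as a lowercase prefix.
def Pre_match_command (input_token : String) (valid_commands : List String) : Prop :=
  (∃ cmd ∈ valid_commands, PySem.Str.lower cmd = PySem.Str.lower input_token) ∨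
  (valid_commands.filter
      (fun cmd => PySem.Str.startswith (PySem.Str.lower cmd) (PySem.Str.lower input_token))).length = 1
instance (input_token : String) (valid_commands : List String) : Decidable (Pre_match_command input_token valid_commands) := by unfold Pre_match_command; infer_instance

def pvWitness_match_command : String × List String := ("sho", ["show", "shutdown"])

def Spec_match_command (input_token : String) (valid_commands : List String) (out : String) : Prop := out = match_command_alt input_token valid_commands
instance (input_token : String) (valid_commands : List String) (out : String) : Decidable (Spec_match_command input_token valid_commands out) := by unfold Spec_match_command; infer_instance

-- ===== CLAIM (what is proved, stated in full; the proofs are below) =====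
def Claim_equal_match_command : Prop := ∀ (input_token : String) (valid_commands : List String), Dom_match_command input_token valid_commands → Pre_match_command input_token valid_commands → Spec_match_command input_token valid_commands (match_command input_token valid_commands)

-- ===== LEMMAS AND PROOFS =====

-- The fold's state is (acc ++ filter, ex <|> first exact).
theorem pvFoldl_step (lower : String) (l : List String) (acc : List String)
    (ex : Option String) :
    l.foldl (pvStep lower) (acc, ex) =
      (acc ++ l.filter (fun cmd => PySem.Str.startswith (PySem.Str.lower cmd) lower),
       match ex with
       | some e => some e
       | none => pvFindExact lower l) := by
  induction l generalizing acc ex with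
  | nil => cases ex <;> simp [pvFindExact]
  | cons c rest ih =>
      cases ex with
      | some e =>
          simp only [List.foldl_cons, pvStep, ih, List.filter_cons]
          split_ifs <;> simp
      | none =>
          simp only [List.foldl_cons, pvStep, ih, List.filter_cons, pvFindExact]
          split_ifs <;> simp

-- ===== VERDICT (by name: the statement is the Claim_ definition above) =====
theorem match_command_spec : Claim_equal_match_command := by
  intro input_token valid_commands _ _
  unfold Spec_match_command match_command match_command_alt
  simp only [pvFoldl_step, List.nil_append]
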